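-- pv_equiv track=rewrite | github.com/jazzm0/hackerrank | super_functional_string.py | superFunctionalStrings
-- ===== SOURCE A (Python) =====
-- def superFunctionalStrings(s):
--     modulo = 10 ** 9 + 7
--     result = 0
--     seen = {}
--     for current_length in range(1, len(s) + 1):
--         for i in range(len(s) - current_length + 1):
--             string = s[i:i + current_length]
--             if string not in seen:
--                 counts = seen.get(string[:-1], {})
--                 counts_copy = counts.copy()
--                 counts_copy[string[-1]] = counts_copy.get(string[-1], 0) + 1
--                 seen[string] = counts_copy
--                 result += current_length ** len(counts_copy) % modulo
--
--     return result % modulo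
-- ===== SOURCE B (Python) =====
-- def superFunctionalStrings(s):
--     modulo = 10 ** 9 + 7
--     n = len(s)
--     result = 0
--     seen = set()
--     for i in range(n):
--         window = set()
--         for j in range(i, n):
--             window.add(s[j])
--             sub = s[i:j + 1]
--             if sub not in seen:
--                 seen.add(sub)
--                 result += (j + 1 - i) ** len(window) % modulo
--     return result % modulo
-- ===== Notes on version B (the rewrite author's own statement) =====
-- stated objective: alternative
-- what changed: B enumerates substrings start-major with an incrementally maintained per-start character set and a plain set of seen substrings, instead of A's length-major sweep that stores a dict mapping every distinct substring to a character-counter dict and copies the prefix's counter for each new substring.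
import Mathlib
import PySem

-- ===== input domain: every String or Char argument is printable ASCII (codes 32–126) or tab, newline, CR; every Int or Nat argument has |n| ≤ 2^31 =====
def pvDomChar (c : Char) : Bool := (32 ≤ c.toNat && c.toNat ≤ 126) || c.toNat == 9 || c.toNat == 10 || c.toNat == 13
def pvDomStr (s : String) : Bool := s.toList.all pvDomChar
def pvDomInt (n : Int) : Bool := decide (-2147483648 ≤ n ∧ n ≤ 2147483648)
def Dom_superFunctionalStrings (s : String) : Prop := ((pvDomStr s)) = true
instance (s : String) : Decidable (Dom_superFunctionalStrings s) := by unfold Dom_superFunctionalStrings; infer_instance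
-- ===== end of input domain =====

-- B replaces A's length-major sweep (a dict mapping each distinct substring to a copied
-- character-counter dict) by a start-major sweep with an incrementally maintained per-start
-- character set and a plain set of seen substrings; same return value on every input.

-- ===== PORT A =====
-- Port of A. The Python iterates lengths 1..len(s), then starts i; `seen` maps each distinct
-- substring to the Counter of its characters, built by copying the prefix's counter.
-- `string` is nonempty at every use of string[-1] (its length is current_length ≥ 1),
-- so Str.pyGet? is `some` there and the `.getD 'A'` default is unreachable.
def superFunctionalStrings (s : String) : Int :=
  let modulo : Int := 10 ^ 9 + 7
  let st : Int × PySem.Dict String (PySem.Dict Char Int) :=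
    (PySem.List.pyRange 1 (PySem.Str.len s + 1) 1).foldl (fun st currentLength =>
      (PySem.List.pyRange 0 (PySem.Str.len s - currentLength + 1) 1).foldl (fun st i =>
        let string := PySem.Str.slice s (some i) (some (i + currentLength))
        if st.2.contains string then st
        else
          let counts := st.2.getD (PySem.Str.slice string none (some (-1))) PySem.Dict.empty
          let c := (PySem.Str.pyGet? string (-1)).getD 'A'
          let countsCopy := counts.insert c (counts.getD c 0 + 1)
          (st.1 + PySem.Int.mod (currentLength ^ countsCopy.size) modulo,
           st.2.insert string countsCopy)) st)
      (0, PySem.Dict.empty)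
  PySem.Int.mod st.1 modulo

-- ===== PORT B =====
-- Port of B (Source B): for each start i, extend the end j, keeping `window` = set of characters of
-- s[i:j+1] (len(window) is ported as window.length, the size of the character set), and a set
-- `seen` of the distinct substrings met so far. s[j] is in range (i ≤ j < len(s)),
-- so Str.pyGet? is `some` there and the `.getD 'A'` default is unreachable.
def superFunctionalStrings_alt (s : String) : Int :=
  let modulo : Int := 10 ^ 9 + 7
  let n := PySem.Str.len s
  let st : Int × PySem.Set String :=
    (PySem.List.pyRange 0 n 1).foldl (fun st i =>
      let inner : Int × PySem.Set String × PySem.Set Char :=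
        (PySem.List.pyRange i n 1).foldl (fun st2 j =>
          let window := PySem.Set.add st2.2.2 ((PySem.Str.pyGet? s j).getD 'A')
          let sub := PySem.Str.slice s (some i) (some (j + 1))
          if PySem.Set.contains st2.2.1 sub then (st2.1, st2.2.1, window)
          else (st2.1 + PySem.Int.mod ((j + 1 - i) ^ window.length) modulo,
                PySem.Set.add st2.2.1 sub, window))
          (st.1, st.2, PySem.Set.empty)
      (inner.1, inner.2.1)) (0, PySem.Set.empty)
  PySem.Int.mod st.1 modulo

-- ===== PRECONDITION & SPEC =====
def Spec_superFunctionalStrings (s : String) (out : Int) : Prop := out = superFunctionalStrings_alt s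
instance (s : String) (out : Int) : Decidable (Spec_superFunctionalStrings s out) := by unfold Spec_superFunctionalStrings; infer_instance

-- ===== CLAIM (what is proved, stated in full; the proofs are below) =====
def Claim_equal_superFunctionalStrings : Prop := ∀ (s : String), Dom_superFunctionalStrings s → Spec_superFunctionalStrings s (superFunctionalStrings s)


-- ===== LEMMAS AND PROOFS =====

-- The modulus and the per-substring contribution: length ^ (number of distinct characters) mod 10^9+7.
def pvM : Int := 10 ^ 9 + 7

def pvTerm (t : String) : Int :=
  PySem.Int.mod ((PySem.Str.len t) ^ (PySem.Set.ofList t.toList).length) pvM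

-- the abstract step both programs refine: a running sum and the set of already-counted substrings
def pvG (st : Int × PySem.Set String) (t : String) : Int × PySem.Set String :=
  if PySem.Set.contains st.2 t then st else (st.1 + pvTerm t, PySem.Set.add st.2 t)

abbrev pvDictA := PySem.Dict String (PySem.Dict Char Int)

-- A's loop body, with the exponent base written as the substring's own length
def pvA (st : Int × pvDictA) (t : String) : Int × pvDictA :=
  if st.2.contains t then st
  else
    let counts := st.2.getD (PySem.Str.slice t none (some (-1))) PySem.Dict.empty
    let c := (PySem.Str.pyGet? t (-1)).getD 'A'
    let countsCopy := counts.insert c (counts.getD c 0 + 1)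
    (st.1 + PySem.Int.mod ((PySem.Str.len t) ^ countsCopy.size) pvM, st.2.insert t countsCopy)

def pvBlk (s : String) (L : Int) : List String :=
  (PySem.List.pyRange 0 (PySem.Str.len s - L + 1) 1).map
    (fun i => PySem.Str.slice s (some i) (some (i + L)))

def pvLA (s : String) (m : Int) : List String :=
  (PySem.List.pyRange 1 (m + 1) 1).flatMap (pvBlk s)

def pvRow (s : String) (i : Int) : List String :=
  (PySem.List.pyRange i (PySem.Str.len s) 1).map
    (fun j => PySem.Str.slice s (some i) (some (j + 1)))

def pvLB (s : String) : List String :=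
  (PySem.List.pyRange 0 (PySem.Str.len s) 1).flatMap (pvRow s)

lemma pvToList_slice (s : String) (a b : Int) (h0 : 0 ≤ a) (h1 : 0 ≤ b) :
    (PySem.Str.slice s (some a) (some b)).toList
      = List.take (b.toNat - a.toNat) (List.drop a.toNat s.toList) := by
  rw [PySem.Str.toList_slice, PySem.Chars.slice_eq_listSlice, PySem.List.slice_toNat _ h0 h1]

lemma pvLen_slice (s : String) (i L : Int) (h0 : 0 ≤ i) (hL : 0 ≤ L)
    (hn : i + L ≤ PySem.Str.len s) :
    PySem.Str.len (PySem.Str.slice s (some i) (some (i + L))) = L := by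
  rw [PySem.Str.len_eq, PySem.Str.toList_slice, PySem.Chars.slice_eq_listSlice,
      PySem.List.slice_toNat _ h0 (by omega)]
  rw [PySem.Str.len_eq] at hn
  simp [List.length_take, List.length_drop, -String.length_toList]
  omega

-- A's nested range fold is the fold of pvA over the list of its substrings
lemma pvA_fold_eq (s : String) :
    superFunctionalStrings s
      = PySem.Int.mod ((pvLA s (PySem.Str.len s)).foldl pvA (0, PySem.Dict.empty)).1 pvM := by
  simp only [superFunctionalStrings, pvLA]
  rw [List.foldl_flatMap]
  have : (10:Int) ^ 9 + 7 = pvM := by norm_num [pvM]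
  rw [this]
  congr 2
  apply PySem.List.foldl_congr_mem
  intro acc L hL
  simp only [pvBlk]
  rw [List.foldl_map]
  apply PySem.List.foldl_congr_mem
  intro st i hi
  rw [PySem.List.mem_pyRange_one] at hL hi
  simp only [pvA]
  rw [pvLen_slice s i L (by omega) (by omega) (by omega)]

lemma pvG_snd (L : List String) (r : Int) (S : PySem.Set String) :
    (L.foldl pvG (r, S)).2 = L.foldl PySem.Set.add S := by
  induction L generalizing r S with
  | nil => rfl
  | cons t L ih =>
    simp only [List.foldl_cons, pvG]
    by_cases h : t ∈ S
    · rw [if_pos (by simpa [PySem.Set.contains_iff] using h), PySem.Set.add_of_mem h, ih]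
    · rw [if_neg (by simpa [PySem.Set.contains_iff] using h), PySem.Set.add_of_not_mem h, ih]

lemma pvG_fst (L : List String) (r : Int) (S : PySem.Set String) :
    (L.foldl pvG (r, S)).1 = r + ∑ t ∈ L.toFinset \ S.toFinset, pvTerm t := by
  induction L generalizing r S with
  | nil => simp
  | cons t L ih =>
    simp only [List.foldl_cons, pvG]
    by_cases h : t ∈ S
    · rw [if_pos (by simpa [PySem.Set.contains_iff] using h), ih]
      congr 1
      apply Finset.sum_congr _ (fun _ _ => rfl)
      ext x
      simp only [Finset.mem_sdiff, List.mem_toFinset, List.toFinset_cons, Finset.mem_insert]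
      constructor
      · rintro ⟨hx, hxs⟩; exact ⟨Or.inr hx, hxs⟩
      · rintro ⟨hx | hx, hxs⟩
        · exact absurd (hx ▸ h) hxs
        · exact ⟨hx, hxs⟩
    · rw [if_neg (by simpa [PySem.Set.contains_iff] using h), ih]
      have hadd : (PySem.Set.add S t).toFinset = insert t S.toFinset := by
        ext x
        simp [PySem.Set.mem_add, or_comm]
      rw [hadd]
      have : (t :: L).toFinset \ S.toFinset = insert t (L.toFinset \ insert t S.toFinset) := by
        ext x
        by_cases hx : x = t <;> simp [hx, h]
      rw [this, Finset.sum_insert (by simp)]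
      ring

lemma pvCounter_snoc (dl : List Char) (c : Char) :
    PySem.Dict.counter (dl ++ [c])
      = (PySem.Dict.counter dl).insert c ((PySem.Dict.counter dl).getD c 0 + 1) := by
  rw [← PySem.Dict.foldl_insert_getD_add_one_eq_counter, List.foldl_append,
      PySem.Dict.foldl_insert_getD_add_one_eq_counter]
  rfl

lemma pvSize_counter (l : List Char) :
    (PySem.Dict.counter l).size = (PySem.Set.ofList l).length := by
  have h1 : (PySem.Dict.counter l).size = (PySem.Dict.counter l).keys.length := by
    simp [PySem.Dict.size, PySem.Dict.keys]
  rw [h1, PySem.Dict.keys_counter]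

-- one block of A's sweep refines the abstract step, given that every element is nonempty and
-- its length-minus-one prefix is empty or already a key (with the Counter invariant on `seen`)
lemma pvA_block (ts : List String) :
    ∀ (r : Int) (seen : pvDictA),
    (∀ t c, seen.get? t = some c → c = PySem.Dict.counter t.toList) →
    seen.contains "" = false →
    (∀ t ∈ ts, t ≠ "" ∧ (t.toList.dropLast = [] ∨ String.ofList t.toList.dropLast ∈ seen.keys)) →
    (ts.foldl pvA (r, seen)).1 = (ts.foldl pvG (r, seen.keys)).1
    ∧ (ts.foldl pvA (r, seen)).2.keys = (ts.foldl pvG (r, seen.keys)).2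
    ∧ (∀ t c, (ts.foldl pvA (r, seen)).2.get? t = some c → c = PySem.Dict.counter t.toList)
    ∧ (ts.foldl pvA (r, seen)).2.contains "" = false := by
  induction ts with
  | nil => exact fun r seen hInv hemp _ => ⟨rfl, rfl, hInv, hemp⟩
  | cons t ts ih =>
    intro r seen hInv hemp hts
    obtain ⟨htne, hpfx⟩ := hts t (List.mem_cons_self)
    have htl : t.toList ≠ [] := fun h => htne (String.toList_eq_nil_iff.mp h)
    simp only [List.foldl_cons, pvA, pvG]
    by_cases hmem : t ∈ seen.keys
    · have hc1 : seen.contains t = true := (PySem.Dict.contains_iff_mem_keys seen t).mpr hmem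
      have hc2 : PySem.Set.contains seen.keys t = true := (PySem.Set.contains_iff _ _).mpr hmem
      rw [if_pos hc1, if_pos hc2]
      exact ih r seen hInv hemp (fun u hu => hts u (List.mem_cons_of_mem _ hu))
    · have hc1 : seen.contains t = false := by
        by_contra h
        exact hmem ((PySem.Dict.contains_iff_mem_keys seen t).mp (by simpa using h))
      have hc2 : PySem.Set.contains seen.keys t = false := by
        by_contra h
        exact hmem ((PySem.Set.contains_iff _ _).mp (by simpa using h))
      rw [if_neg (by simp only [Bool.not_eq_true]; exact hc1),
          if_neg (by simp only [Bool.not_eq_true]; exact hc2)]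
      -- the looked-up counts are the Counter of the dropLast prefix
      have hpl : (PySem.Str.slice t none (some (-1))).toList = t.toList.dropLast :=
        PySem.Str.slice_to_neg_one t
      have hcounts : seen.getD (PySem.Str.slice t none (some (-1))) PySem.Dict.empty
          = PySem.Dict.counter t.toList.dropLast := by
        rcases hpfx with h | h
        · have : PySem.Str.slice t none (some (-1)) = "" := by
            apply String.toList_inj.mp; rw [hpl, h]; rfl
          rw [this, PySem.Dict.getD_eq_get?_getD,
              (PySem.Dict.get?_eq_none_iff_contains seen "").mpr hemp, h]
          rfl
        · have heq : String.ofList t.toList.dropLast = PySem.Str.slice t none (some (-1)) := by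
            apply String.toList_inj.mp; rw [hpl, String.toList_ofList]
          rw [heq] at h
          have := (PySem.Dict.contains_iff_mem_keys seen _).mpr h
          rcases ho : seen.get? (PySem.Str.slice t none (some (-1))) with _ | c
          · rw [(PySem.Dict.get?_eq_none_iff_contains seen _).mp ho] at this; simp at this
          · rw [PySem.Dict.getD_eq_get?_getD, ho]
            simpa [hpl] using hInv _ _ ho
      have hcchar : (PySem.Str.pyGet? t (-1)).getD 'A' = t.toList.getLast htl := by
        rw [show PySem.Str.pyGet? t (-1) = PySem.List.pyGet? t.toList (-1) by simp,
            PySem.List.pyGet?_neg_one, List.getLast?_eq_some_getLast htl]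
        rfl
      have hcopy : (seen.getD (PySem.Str.slice t none (some (-1))) PySem.Dict.empty).insert
            ((PySem.Str.pyGet? t (-1)).getD 'A')
            ((seen.getD (PySem.Str.slice t none (some (-1))) PySem.Dict.empty).getD
              ((PySem.Str.pyGet? t (-1)).getD 'A') 0 + 1)
          = PySem.Dict.counter t.toList := by
        rw [hcounts, hcchar, ← pvCounter_snoc, List.dropLast_concat_getLast htl]
      rw [hcopy]
      have hterm : PySem.Int.mod (PySem.Str.len t ^ (PySem.Dict.counter t.toList).size) pvM
          = pvTerm t := by
        rw [pvSize_counter]; rfl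
      rw [hterm]
      have hkeys : (seen.insert t (PySem.Dict.counter t.toList)).keys = seen.keys ++ [t] :=
        PySem.Dict.keys_insert_of_not_contains seen _ hc1
      have hadd : PySem.Set.add seen.keys t = seen.keys ++ [t] := PySem.Set.add_of_not_mem hmem
      have hInv' : ∀ u c, (seen.insert t (PySem.Dict.counter t.toList)).get? u = some c →
          c = PySem.Dict.counter u.toList := by
        intro u c hu
        by_cases h : u = t
        · subst h
          rw [PySem.Dict.get?_insert_self] at hu
          exact (Option.some_inj.mp hu).symm
        · rw [PySem.Dict.get?_insert_of_ne _ _ h] at hu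
          exact hInv u c hu
      have hemp' : (seen.insert t (PySem.Dict.counter t.toList)).contains "" = false := by
        rw [PySem.Dict.contains_insert]
        simp [hemp, Ne.symm htne]
      have hts' : ∀ u ∈ ts, u ≠ "" ∧ (u.toList.dropLast = [] ∨
          String.ofList u.toList.dropLast ∈ (seen.insert t (PySem.Dict.counter t.toList)).keys) := by
        intro u hu
        refine ⟨(hts u (List.mem_cons_of_mem _ hu)).1, ?_⟩
        rcases (hts u (List.mem_cons_of_mem _ hu)).2 with h | h
        · exact Or.inl h
        · exact Or.inr (by rw [hkeys]; exact List.mem_append_left _ h)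
      have := ih (r + pvTerm t) (seen.insert t (PySem.Dict.counter t.toList)) hInv' hemp' hts'
      rw [hkeys] at this
      rw [hadd]
      exact this

lemma pvBlk_elem (s : String) (m : Nat) (t : String) (ht : t ∈ pvBlk s ((m : Int) + 1)) :
    ∃ i : Int, 0 ≤ i ∧ i + (m + 1) ≤ PySem.Str.len s ∧
      t = PySem.Str.slice s (some i) (some (i + ((m : Int) + 1))) := by
  simp only [pvBlk, List.mem_map] at ht
  obtain ⟨i, hi, rfl⟩ := ht
  rw [PySem.List.mem_pyRange_one] at hi
  exact ⟨i, by omega, by omega, rfl⟩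

lemma pvSlice_toList_len (s : String) (i L : Int) (h0 : 0 ≤ i) (hL : 0 ≤ L)
    (hn : i + L ≤ PySem.Str.len s) :
    (PySem.Str.slice s (some i) (some (i + L))).toList
      = List.take L.toNat (List.drop i.toNat s.toList) ∧
    (List.take L.toNat (List.drop i.toNat s.toList)).length = L.toNat := by
  rw [PySem.Str.len_eq] at hn
  constructor
  · rw [pvToList_slice s i (i+L) h0 (by omega)]
    congr 1
    omega
  · simp [List.length_take, List.length_drop, -String.length_toList]
    omega

-- A's whole sweep refines the abstract fold
lemma pvA_outer (s : String) : ∀ (m : Nat),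
    ((pvLA s m).foldl pvA (0, PySem.Dict.empty)).1
        = ((pvLA s m).foldl pvG (0, PySem.Set.empty)).1
    ∧ ((pvLA s m).foldl pvA (0, PySem.Dict.empty)).2.keys
        = ((pvLA s m).foldl pvG (0, PySem.Set.empty)).2
    ∧ (∀ t c, ((pvLA s m).foldl pvA (0, PySem.Dict.empty)).2.get? t = some c →
        c = PySem.Dict.counter t.toList)
    ∧ ((pvLA s m).foldl pvA (0, PySem.Dict.empty)).2.contains "" = false
    ∧ (∀ (L i : Int), 1 ≤ L → L ≤ m → 0 ≤ i → i + L ≤ PySem.Str.len s →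
        PySem.Str.slice s (some i) (some (i + L))
          ∈ ((pvLA s m).foldl pvA (0, PySem.Dict.empty)).2.keys) := by
  intro m
  induction m with
  | zero =>
    refine ⟨rfl, rfl, ?_, rfl, ?_⟩
    · intro t c h
      rw [show pvLA s ((0:Nat):Int) = [] from rfl] at h
      simp [PySem.Dict.empty, PySem.Dict.get?] at h
    · intro L i h1 h2 _ _
      norm_num at h2
      omega
  | succ m ih =>
    obtain ⟨ih1, ih2, ih3, ih4, ih5⟩ := ih
    have hsplit : pvLA s ((m + 1 : Nat) : Int) = pvLA s m ++ pvBlk s ((m : Int) + 1) := by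
      simp only [pvLA]
      rw [show (((m + 1 : Nat) : Int) + 1) = (((m : Int) + 1) + 1) by push_cast; ring,
          PySem.List.pyRange_one_succ_right (a := 1) (b := (m : Int) + 1) (by omega),
          List.flatMap_append]
      simp
    rw [hsplit, List.foldl_append, List.foldl_append]
    set F := (pvLA s m).foldl pvA ((0 : Int), (PySem.Dict.empty : pvDictA)) with hF
    set G := (pvLA s m).foldl pvG ((0 : Int), (PySem.Set.empty : PySem.Set String)) with hG
    have hblkhyp : ∀ t ∈ pvBlk s ((m : Int) + 1), t ≠ "" ∧ (t.toList.dropLast = [] ∨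
        String.ofList t.toList.dropLast ∈ F.2.keys) := by
      intro t ht
      obtain ⟨i, hi0, hin, rfl⟩ := pvBlk_elem s m t ht
      obtain ⟨htl, hlen⟩ := pvSlice_toList_len s i ((m : Int)+1) hi0 (by omega) hin
      have hne : PySem.Str.slice s (some i) (some (i + ((m : Int) + 1))) ≠ "" := by
        intro h
        have := String.toList_eq_nil_iff.mpr h
        rw [htl] at this
        rw [this] at hlen
        simp at hlen
      refine ⟨hne, ?_⟩
      by_cases hm : m = 0
      · subst hm
        left
        rw [htl, List.dropLast_eq_take, hlen]
        simp
      · right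
        rw [htl, List.dropLast_eq_take, hlen]
        have h1 : ((m : Int) + 1).toNat - 1 = m := by omega
        rw [h1, List.take_take, show min m ((m : Int) + 1).toNat = m by omega]
        have h2 : List.take m (List.drop i.toNat s.toList)
            = (PySem.Str.slice s (some i) (some (i + (m : Int)))).toList := by
          obtain ⟨htl2, _⟩ := pvSlice_toList_len s i (m : Int) hi0 (by omega) (by omega)
          rw [htl2]; simp
        rw [h2, String.ofList_toList]
        exact ih5 (m : Int) i (by omega) (by omega) hi0 (by omega)
    obtain ⟨hb1, hb2, hb3, hb4⟩ := pvA_block (pvBlk s ((m : Int) + 1)) F.1 F.2 ih3 ih4 hblkhyp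
    rw [show ((F.1, F.2) : Int × pvDictA) = F from rfl] at hb1 hb2 hb3 hb4
    have hGkeys : (pvBlk s ((m : Int) + 1)).foldl pvG (F.1, F.2.keys)
        = (pvBlk s ((m : Int) + 1)).foldl pvG G := by
      rw [ih1, ih2]
    refine ⟨?_, ?_, hb3, hb4, ?_⟩
    · rw [hb1, hGkeys]
    · rw [hb2, hGkeys]
    · intro L i hL1 hL2 hi0 hin
      have hkeys : ((pvBlk s ((m : Int) + 1)).foldl pvA F).2.keys
          = PySem.Set.update F.2.keys (pvBlk s ((m : Int) + 1)) := by
        rw [hb2, pvG_snd]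
        rfl
      rw [hkeys, PySem.Set.mem_update]
      by_cases hLm : L ≤ (m : Int)
      · exact Or.inl (ih5 L i hL1 hLm hi0 hin)
      · have hLeq : L = (m : Int) + 1 := by omega
        subst hLeq
        right
        simp only [pvBlk, List.mem_map]
        exact ⟨i, PySem.List.mem_pyRange_one.mpr ⟨hi0, by omega⟩, rfl⟩


-- B's inner loop refines the abstract fold over one row
lemma pvB_inner (s : String) (i : Int) (hi : 0 ≤ i) :
    ∀ (k : Nat) (j0 r : Int) (S : PySem.Set String), i ≤ j0 → j0 + k = PySem.Str.len s →
    (((PySem.List.pyRange j0 (PySem.Str.len s) 1).foldl (fun st2 j =>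
        let window := PySem.Set.add st2.2.2 ((PySem.Str.pyGet? s j).getD 'A')
        let sub := PySem.Str.slice s (some i) (some (j + 1))
        if PySem.Set.contains st2.2.1 sub then (st2.1, st2.2.1, window)
        else (st2.1 + PySem.Int.mod ((j + 1 - i) ^ window.length) pvM,
              PySem.Set.add st2.2.1 sub, window))
      (r, S, PySem.Set.ofList ((PySem.Str.slice s (some i) (some j0)).toList))).1,
     ((PySem.List.pyRange j0 (PySem.Str.len s) 1).foldl (fun st2 j =>
        let window := PySem.Set.add st2.2.2 ((PySem.Str.pyGet? s j).getD 'A')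
        let sub := PySem.Str.slice s (some i) (some (j + 1))
        if PySem.Set.contains st2.2.1 sub then (st2.1, st2.2.1, window)
        else (st2.1 + PySem.Int.mod ((j + 1 - i) ^ window.length) pvM,
              PySem.Set.add st2.2.1 sub, window))
      (r, S, PySem.Set.ofList ((PySem.Str.slice s (some i) (some j0)).toList))).2.1)
    = ((PySem.List.pyRange j0 (PySem.Str.len s) 1).map
        (fun j => PySem.Str.slice s (some i) (some (j + 1)))).foldl pvG (r, S) := by
  intro k
  induction k with
  | zero =>
    intro j0 r S hij hk
    rw [PySem.List.pyRange_one_eq_nil (by omega)]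
    rfl
  | succ k ih =>
    intro j0 r S hij hk
    rw [PySem.List.pyRange_one_cons (by omega)]
    simp only [List.foldl_cons, List.map_cons]
    have hj0n : j0 < PySem.Str.len s := by omega
    have hlen : j0.toNat < s.toList.length := by
      rw [PySem.Str.len_eq] at hj0n; omega
    have hget0 : PySem.Str.pyGet? s ((j0.toNat : Nat) : Int) = s.toList[j0.toNat]? :=
      PySem.Str.pyGet?_natCast s j0.toNat
    rw [show ((j0.toNat : Nat) : Int) = j0 by omega] at hget0
    have hget : (PySem.Str.pyGet? s j0).getD 'A' = s.toList[j0.toNat] := by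
      rw [hget0, List.getElem?_eq_getElem hlen]
      rfl
    have hwin : PySem.Set.add (PySem.Set.ofList ((PySem.Str.slice s (some i) (some j0)).toList))
          ((PySem.Str.pyGet? s j0).getD 'A')
        = PySem.Set.ofList ((PySem.Str.slice s (some i) (some (j0 + 1))).toList) := by
      rw [hget, ← PySem.Set.ofList_append_singleton]
      congr 1
      rw [pvToList_slice s i j0 hi (by omega), pvToList_slice s i (j0+1) hi (by omega)]
      rw [show (j0+1).toNat - i.toNat = (j0.toNat - i.toNat) + 1 by omega, List.take_add_one]
      congr 1
      rw [List.getElem?_drop, show i.toNat + (j0.toNat - i.toNat) = j0.toNat by omega,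
          List.getElem?_eq_getElem hlen]
      rfl
    have hsub : PySem.Str.len (PySem.Str.slice s (some i) (some (j0 + 1))) = j0 + 1 - i := by
      have := pvLen_slice s i (j0 + 1 - i) hi (by omega) (by omega)
      rwa [show i + (j0 + 1 - i) = j0 + 1 by ring] at this
    have hterm : PySem.Int.mod ((j0 + 1 - i) ^
          (PySem.Set.ofList ((PySem.Str.slice s (some i) (some (j0 + 1))).toList)).length) pvM
        = pvTerm (PySem.Str.slice s (some i) (some (j0 + 1))) := by
      simp only [pvTerm]
      rw [hsub]
    simp only [hwin]
    by_cases hc : PySem.Str.slice s (some i) (some (j0 + 1)) ∈ S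
    · have hct : PySem.Set.contains S (PySem.Str.slice s (some i) (some (j0 + 1))) = true :=
        (PySem.Set.contains_iff _ _).mpr hc
      have hgs : pvG (r, S) (PySem.Str.slice s (some i) (some (j0 + 1))) = (r, S) := by
        simp only [pvG]
        rw [if_pos hct]
      rw [if_pos hct, hgs]
      exact ih (j0 + 1) r S (by omega) (by omega)
    · have hcf : PySem.Set.contains S (PySem.Str.slice s (some i) (some (j0 + 1))) = false := by
        simp only [Bool.eq_false_iff]
        intro h
        exact hc ((PySem.Set.contains_iff _ _).mp h)
      have hgs : pvG (r, S) (PySem.Str.slice s (some i) (some (j0 + 1)))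
          = (r + pvTerm (PySem.Str.slice s (some i) (some (j0 + 1))),
             PySem.Set.add S (PySem.Str.slice s (some i) (some (j0 + 1)))) := by
        simp only [pvG]
        rw [if_neg (by simpa using hc)]
      rw [if_neg (by simpa using hc), hgs, hterm]
      exact ih (j0 + 1) (r + pvTerm _) (PySem.Set.add S _) (by omega) (by omega)


-- B's whole sweep is the abstract fold over its substring list
lemma pvB_fold_eq (s : String) :
    superFunctionalStrings_alt s
      = PySem.Int.mod ((pvLB s).foldl pvG (0, PySem.Set.empty)).1 pvM := by
  simp only [superFunctionalStrings_alt, pvLB]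
  rw [List.foldl_flatMap]
  have hM : (10:Int) ^ 9 + 7 = pvM := by norm_num [pvM]
  rw [hM]
  congr 2
  apply PySem.List.foldl_congr_mem
  intro acc i hi
  rw [PySem.List.mem_pyRange_one] at hi
  have hW : (PySem.Set.empty : PySem.Set Char)
      = PySem.Set.ofList ((PySem.Str.slice s (some i) (some i)).toList) := by
    rw [pvToList_slice s i i hi.1 hi.1]
    simp
  rw [show (acc.1, acc.2, (PySem.Set.empty : PySem.Set Char))
      = (acc.1, acc.2, PySem.Set.ofList ((PySem.Str.slice s (some i) (some i)).toList)) by rw [← hW]]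
  have h := pvB_inner s i hi.1 (PySem.Str.len s - i).toNat i acc.1 acc.2 le_rfl (by omega)
  simp only [pvRow]
  rw [show ((acc.1, acc.2) : Int × PySem.Set String) = acc from rfl] at h
  exact h


-- both programs enumerate exactly the nonempty substrings of s
lemma pvLA_toFinset (s : String) :
    (pvLA s (PySem.Str.len s)).toFinset = (pvLB s).toFinset := by
  ext t
  simp only [pvLA, pvLB, pvBlk, pvRow, List.mem_toFinset, List.mem_flatMap, List.mem_map,
    PySem.List.mem_pyRange_one]
  constructor
  · rintro ⟨L, ⟨hL1, hL2⟩, i, ⟨hi1, hi2⟩, rfl⟩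
    refine ⟨i, ⟨hi1, by omega⟩, i + L - 1, ⟨by omega, by omega⟩, ?_⟩
    rw [show i + L - 1 + 1 = i + L by ring]
  · rintro ⟨i, ⟨hi1, hi2⟩, j, ⟨hj1, hj2⟩, rfl⟩
    refine ⟨j + 1 - i, ⟨by omega, by omega⟩, i, ⟨hi1, by omega⟩, ?_⟩
    rw [show i + (j + 1 - i) = j + 1 by ring]


-- ===== VERDICT (by name: the statement is the Claim_ definition above) =====
theorem superFunctionalStrings_spec : Claim_equal_superFunctionalStrings := by
  intro s _
  unfold Spec_superFunctionalStrings
  rw [pvA_fold_eq s, pvB_fold_eq s]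
  have h1 := (pvA_outer s s.toList.length).1
  rw [show ((s.toList.length : Nat) : Int) = PySem.Str.len s from (PySem.Str.len_eq s).symm] at h1
  rw [h1, pvG_fst, pvG_fst, pvLA_toFinset s]
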